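-- pv_equiv track=rewrite | github.com/KyungtaekOh/Programmers | Programmers/Others/[CodingTest]_Number_Game.py | solution
-- ===== SOURCE A (Python) =====
-- def solution(A, B):
--     A, B = sorted(A), sorted(B)
--     answer = 0
--     a, b = 0, 0
--     while a<len(A) and b<len(B):
--         if A[a] < B[b]:
--             answer += 1
--             a += 1
--             b += 1
--         else:
--             b += 1
--     return answer
-- ===== SOURCE B (Python) =====
-- def solution(A, B):
--     sa, sb = sorted(A), sorted(B)
--
--     def feasible(k):
--         # the k smallest A's can each be beaten by one of the k largest B's
--         return all(sa[i] < sb[len(sb) - k + i] for i in range(k))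
--
--     lo, hi = 0, min(len(sa), len(sb))
--     while lo < hi:
--         mid = (lo + hi + 1) // 2
--         if feasible(mid):
--             lo = mid
--         else:
--             hi = mid - 1
--     return lo
-- ===== Notes on version B (the rewrite author's own statement) =====
-- stated objective: alternative
-- what changed: Replaced the linear two-pointer greedy sweep by a binary search on the answer k, with a feasibility predicate checking elementwise that the k smallest A's are each beaten by the k largest B's (feasibility is monotone in k, and the greedy count is exactly the largest feasible k).
import Mathlib
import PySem

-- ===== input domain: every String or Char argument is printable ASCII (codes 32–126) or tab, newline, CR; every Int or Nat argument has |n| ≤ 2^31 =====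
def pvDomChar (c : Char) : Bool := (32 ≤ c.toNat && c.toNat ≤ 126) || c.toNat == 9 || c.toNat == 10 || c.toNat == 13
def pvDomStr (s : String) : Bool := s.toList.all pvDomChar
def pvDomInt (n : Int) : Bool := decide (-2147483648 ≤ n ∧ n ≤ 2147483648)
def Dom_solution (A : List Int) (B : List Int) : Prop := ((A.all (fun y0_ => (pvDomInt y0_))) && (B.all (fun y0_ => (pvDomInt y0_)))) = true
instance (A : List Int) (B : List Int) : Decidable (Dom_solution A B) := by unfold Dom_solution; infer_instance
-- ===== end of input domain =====

-- B replaces A's linear two-pointer greedy sweep by a binary search on the answer k,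
-- checking feasibility (the k smallest A's each beaten by the k largest B's); same value, alternative algorithm.


-- ===== PORT A =====
-- while a<len(A) and b<len(B): … (indices are always ≥ 0 in Python, transliterated as Nat;
-- fuel = len(B) only makes the recursion structural: b grows by 1 every iteration, so it never runs out)
def solutionLoop (sA sB : List Int) (fuel : Nat) (answer : Int) (a b : Nat) : Int :=
  match fuel with
  | 0 => answer
  | fuel + 1 =>
    if h : a < sA.length ∧ b < sB.length then
      if sA[a]'h.1 < sB[b]'h.2 then solutionLoop sA sB fuel (answer + 1) (a + 1) (b + 1)
      else solutionLoop sA sB fuel answer a (b + 1)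
    else answer

def solution (A : List Int) (B : List Int) : Int :=
  solutionLoop (PySem.List.sorted A (fun x => x) false) (PySem.List.sorted B (fun x => x) false)
    (PySem.List.sorted B (fun x => x) false).length 0 0 0

-- ===== PORT B =====
-- all(sa[i] < sb[len(sb)-k+i] for i in range(k)); the indices are always in range at the call sites,
-- so the .getD 0 default on pyGet? is unreachable
def feasible (sa sb : List Int) (k : Int) : Bool :=
  (PySem.List.pyRange 0 k 1).all
    (fun i => decide ((PySem.List.pyGet? sa i).getD 0 < (PySem.List.pyGet? sb ((sb.length : Int) - k + i)).getD 0))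

-- while lo < hi: mid = (lo+hi+1)//2; if feasible(mid): lo = mid else: hi = mid - 1
-- (fuel = len(A)+len(B)+1 only makes the recursion structural: hi-lo shrinks every iteration,
-- starting from min(len(A),len(B)), so the fuel never runs out)
def bsearchLoop (sa sb : List Int) (fuel : Nat) (lo hi : Int) : Int :=
  match fuel with
  | 0 => lo
  | fuel + 1 =>
    if lo < hi then
      if feasible sa sb (PySem.Int.floordiv (lo + hi + 1) 2) then
        bsearchLoop sa sb fuel (PySem.Int.floordiv (lo + hi + 1) 2) hi
      else
        bsearchLoop sa sb fuel lo (PySem.Int.floordiv (lo + hi + 1) 2 - 1)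
    else lo

def solution_alt (A : List Int) (B : List Int) : Int :=
  bsearchLoop (PySem.List.sorted A (fun x => x) false) (PySem.List.sorted B (fun x => x) false)
    ((PySem.List.sorted A (fun x => x) false).length + (PySem.List.sorted B (fun x => x) false).length + 1)
    0 (min ((PySem.List.sorted A (fun x => x) false).length : Int)
           ((PySem.List.sorted B (fun x => x) false).length : Int))

-- ===== PRECONDITION & SPEC =====
def Spec_solution (A : List Int) (B : List Int) (out : Int) : Prop := out = solution_alt A B
instance (A : List Int) (B : List Int) (out : Int) : Decidable (Spec_solution A B out) := by unfold Spec_solution; infer_instance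

-- ===== CLAIM (what is proved, stated in full; the proofs are below) =====
def Claim_equal_solution : Prop := ∀ (A : List Int) (B : List Int), Dom_solution A B → Spec_solution A B (solution A B)

-- ===== LEMMAS AND PROOFS =====

-- the greedy count of A, as a Nat-valued list recursion
def gN : List Int → List Int → Nat
  | _, [] => 0
  | [], _ :: _ => 0
  | x :: xs, y :: ys => if x < y then gN xs ys + 1 else gN (x :: xs) ys
termination_by _ b => b.length

theorem gN_nil (A : List Int) : gN A [] = 0 := by cases A <;> simp [gN]

theorem gN_nil_left (B : List Int) : gN [] B = 0 := by cases B <;> simp [gN]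

-- A's index loop computes gN on the remaining suffixes
theorem solutionLoop_eq (sA sB : List Int) :
    ∀ (fuel : Nat) (answer : Int) (a b : Nat), sB.length - b ≤ fuel →
      solutionLoop sA sB fuel answer a b = answer + gN (sA.drop a) (sB.drop b) := by
  intro fuel
  induction fuel with
  | zero =>
    intro answer a b hf
    have : sB.drop b = [] := List.drop_eq_nil_of_le (by omega)
    rw [this, gN_nil, solutionLoop]
    ring
  | succ fuel ih =>
    intro answer a b hf
    rw [solutionLoop]
    by_cases h : a < sA.length ∧ b < sB.length
    · rw [dif_pos h]
      by_cases hlt : sA[a]'h.1 < sB[b]'h.2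
      · rw [if_pos hlt, ih _ _ _ (by omega),
          List.drop_eq_getElem_cons h.1, List.drop_eq_getElem_cons h.2]
        simp only [gN, if_pos hlt]
        push_cast
        ring
      · rw [if_neg hlt, ih _ _ _ (by omega),
          List.drop_eq_getElem_cons h.1, List.drop_eq_getElem_cons h.2]
        conv_rhs => rw [gN]
        rw [if_neg hlt]
    · rw [dif_neg h]
      rcases not_and_or.mp h with h | h
      · have : sA.drop a = [] := List.drop_eq_nil_of_le (by omega)
        rw [this, gN_nil_left]; ring
      · have : sB.drop b = [] := List.drop_eq_nil_of_le (by omega)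
        rw [this, gN_nil]; ring

-- feasibility: the k smallest A's are each beaten elementwise by the k largest B's
def Feas (sa sb : List Int) (k : Nat) : Prop :=
  k ≤ sa.length ∧ k ≤ sb.length ∧
    ∀ i : Nat, i < k → sa.getD i 0 < sb.getD (sb.length - k + i) 0

theorem pair_getD_mono (l : List Int) (hp : l.Pairwise (fun p q => p ≤ q))
    {i j : Nat} (hij : i ≤ j) (hj : j < l.length) : l.getD i 0 ≤ l.getD j 0 := by
  have hi : i < l.length := lt_of_le_of_lt hij hj
  rw [List.getD_eq_getElem l 0 hi, List.getD_eq_getElem l 0 hj]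
  rcases eq_or_lt_of_le hij with rfl | hlt
  · exact le_refl _
  · exact List.pairwise_iff_getElem.mp hp i j hi hj hlt

-- the greedy count is feasible (needs sb sorted)
theorem gN_feas (sb : List Int) (hsb : sb.Pairwise (fun p q => p ≤ q)) :
    ∀ sa : List Int, Feas sa sb (gN sa sb) := by
  induction sb with
  | nil => intro sa; rw [gN_nil]; exact ⟨Nat.zero_le _, Nat.zero_le _, by omega⟩
  | cons y ys ih =>
    intro sa
    cases sa with
    | nil => rw [gN_nil_left]; exact ⟨Nat.zero_le _, Nat.zero_le _, by omega⟩
    | cons x xs =>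
      have hy : ∀ b ∈ ys, y ≤ b := fun b hb => List.rel_of_pairwise_cons hsb hb
      by_cases hxy : x < y
      · simp only [gN, if_pos hxy]
        obtain ⟨h1, h2, h3⟩ := ih hsb.tail xs
        refine ⟨by simp; omega, by simp; omega, ?_⟩
        intro i hi
        have hidx : (y :: ys).length - (gN xs ys + 1) + i = ys.length - gN xs ys + i := by
          simp only [List.length_cons]; omega
        rw [hidx]
        cases i with
        | zero =>
          rcases Nat.eq_or_lt_of_le h2 with heq | hlt
          · have : ys.length - gN xs ys + 0 = 0 := by omega
            rw [this]
            simpa using hxy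
          · have hpos : ys.length - gN xs ys + 0 = (ys.length - gN xs ys - 1) + 1 := by omega
            rw [hpos, List.getD_cons_succ, List.getD_cons_zero]
            have hin : ys.length - gN xs ys - 1 < ys.length := by omega
            have hmem : ys.getD (ys.length - gN xs ys - 1) 0 ∈ ys := by
              rw [List.getD_eq_getElem ys 0 hin]; exact List.getElem_mem hin
            exact lt_of_lt_of_le hxy (hy _ hmem)
        | succ j =>
          have hidx2 : ys.length - gN xs ys + (j + 1) = (ys.length - gN xs ys + j) + 1 := by omega
          rw [hidx2, List.getD_cons_succ, List.getD_cons_succ]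
          exact h3 j (by omega)
      · simp only [gN, if_neg hxy]
        obtain ⟨h1, h2, h3⟩ := ih hsb.tail (x :: xs)
        refine ⟨h1, by simp; omega, ?_⟩
        intro i hi
        have hidx : (y :: ys).length - gN (x :: xs) ys + i = (ys.length - gN (x :: xs) ys + i) + 1 := by
          simp only [List.length_cons]; omega
        rw [hidx, List.getD_cons_succ]
        exact h3 i hi

-- every feasible k is at most the greedy count (no sortedness needed)
theorem feas_le_gN (sb : List Int) :
    ∀ (sa : List Int) (k : Nat), Feas sa sb k → k ≤ gN sa sb := by
  induction sb with
  | nil => intro sa k h; rw [gN_nil]; exact le_trans h.2.1 (by simp)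
  | cons y ys ih =>
    intro sa k h
    cases sa with
    | nil => have := h.1; simp at this; omega
    | cons x xs =>
      cases k with
      | zero => exact Nat.zero_le _
      | succ j =>
        obtain ⟨h1, h2, h3⟩ := h
        by_cases hxy : x < y
        · simp only [gN, if_pos hxy]
          have hfeas : Feas xs ys j := by
            refine ⟨by simp at h1; omega, by simp at h2; omega, ?_⟩
            intro i hi
            have := h3 (i + 1) (by omega)
            have hidx : (y :: ys).length - (j + 1) + (i + 1) = (ys.length - j + i) + 1 := by
              simp only [List.length_cons] at h2 ⊢; omega
            rw [hidx, List.getD_cons_succ, List.getD_cons_succ] at this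
            exact this
          have := ih xs j hfeas
          omega
        · have hk : j + 1 ≤ ys.length := by
            by_contra hcon
            have hkm : j + 1 = ys.length + 1 := by simp at h2; omega
            have := h3 0 (by omega)
            have hidx : (y :: ys).length - (j + 1) + 0 = 0 := by simp only [List.length_cons]; omega
            rw [hidx, List.getD_cons_zero, List.getD_cons_zero] at this
            exact hxy this
          simp only [gN, if_neg hxy]
          refine ih (x :: xs) (j + 1) ⟨h1, hk, ?_⟩
          intro i hi
          have := h3 i (by omega)
          have hidx : (y :: ys).length - (j + 1) + i = (ys.length - (j + 1) + i) + 1 := by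
            simp only [List.length_cons]; omega
          rw [hidx, List.getD_cons_succ] at this
          exact this

-- feasibility is downward monotone (needs sb sorted)
theorem feas_pred (sa sb : List Int) (hsb : sb.Pairwise (fun p q => p ≤ q)) (k : Nat)
    (h : Feas sa sb (k + 1)) : Feas sa sb k := by
  obtain ⟨h1, h2, h3⟩ := h
  refine ⟨by omega, by omega, ?_⟩
  intro i hi
  have := h3 i (by omega)
  refine lt_of_lt_of_le this (pair_getD_mono sb hsb (by omega) (by omega))

theorem feas_mono (sa sb : List Int) (hsb : sb.Pairwise (fun p q => p ≤ q)) :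
    ∀ (d k : Nat), Feas sa sb (k + d) → Feas sa sb k := by
  intro d
  induction d with
  | zero => intro k h; exact h
  | succ n ihd => intro k h; exact ihd k (feas_pred sa sb hsb (k + n) h)

-- the feasibility check of the port computes Feas
theorem feasible_iff (sa sb : List Int) (k : Int) (h0 : 0 ≤ k)
    (hA : k.toNat ≤ sa.length) (hB : k.toNat ≤ sb.length) :
    feasible sa sb k = true ↔ Feas sa sb k.toNat := by
  unfold feasible Feas
  rw [List.all_eq_true]
  constructor
  · intro h
    refine ⟨hA, hB, ?_⟩
    intro i hi
    have hmem : (i : Int) ∈ PySem.List.pyRange 0 k 1 := by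
      rw [PySem.List.mem_pyRange_one]; omega
    have := h _ hmem
    have e : (sb.length : Int) - k + (i : Int) = ((sb.length - k.toNat + i : Nat) : Int) := by
      push_cast; omega
    rw [e] at this
    simp only [PySem.List.pyGet?_natCast, decide_eq_true_eq] at this
    simpa [List.getD] using this
  · intro h i hmem
    rw [PySem.List.mem_pyRange_one] at hmem
    have hi : i.toNat < k.toNat := by omega
    have hval := h.2.2 i.toNat hi
    have e1 : i = ((i.toNat : Nat) : Int) := by omega
    have e2 : (sb.length : Int) - k + ((i.toNat : Nat) : Int) = ((sb.length - k.toNat + i.toNat : Nat) : Int) := by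
      push_cast; omega
    rw [e1, e2]
    simp only [PySem.List.pyGet?_natCast, decide_eq_true_eq]
    simpa [List.getD] using hval

-- binary-search correctness: with a monotone oracle the loop returns its threshold M
theorem bsearchLoop_eq (sa sb : List Int) (M : Int)
    (hfe : ∀ k : Int, 0 < k → k ≤ (sa.length : Int) → k ≤ (sb.length : Int) →
      (feasible sa sb k = true ↔ k ≤ M)) :
    ∀ (fuel : Nat) (lo hi : Int), (hi - lo).toNat < fuel → 0 ≤ lo → lo ≤ M → M ≤ hi →
      hi ≤ (sa.length : Int) → hi ≤ (sb.length : Int) → bsearchLoop sa sb fuel lo hi = M := by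
  intro fuel
  induction fuel with
  | zero => intro lo hi hn; omega
  | succ n ihn =>
    intro lo hi hn hlo hloM hMhi hhA hhB
    by_cases hlt : lo < hi
    · rw [bsearchLoop, if_pos hlt,
        PySem.Int.floordiv_eq_ediv_of_pos (by norm_num : (0:Int) < 2)]
      have hmid : lo < (lo + hi + 1) / 2 ∧ (lo + hi + 1) / 2 ≤ hi := by omega
      by_cases hf : feasible sa sb ((lo + hi + 1) / 2) = true
      · rw [if_pos hf]
        have hM : (lo + hi + 1) / 2 ≤ M :=
          (hfe _ (by omega) (by omega) (by omega)).mp hf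
        exact ihn _ _ (by omega) (by omega) hM hMhi hhA hhB
      · rw [if_neg hf]
        have hM : M < (lo + hi + 1) / 2 := by
          by_contra hcon
          exact hf ((hfe _ (by omega) (by omega) (by omega)).mpr (by omega))
        exact ihn _ _ (by omega) hlo hloM (by omega) (by omega) (by omega)
    · rw [bsearchLoop, if_neg hlt]
      omega

-- ===== VERDICT (by name: the statement is the Claim_ definition above) =====
theorem solution_spec : Claim_equal_solution := by
  intro A B _
  unfold Spec_solution solution solution_alt
  set sA := PySem.List.sorted A (fun x => x) false with hsA
  set sB := PySem.List.sorted B (fun x => x) false with hsB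
  have hsb : sB.Pairwise (fun p q => p ≤ q) := by
    simpa using PySem.List.sorted_pairwise B (fun x => x)
  have hG1 := gN_feas sB hsb sA
  have hlenA : gN sA sB ≤ sA.length := hG1.1
  have hlenB : gN sA sB ≤ sB.length := hG1.2.1
  rw [solutionLoop_eq sA sB sB.length 0 0 0 (by omega)]
  simp only [List.drop_zero, zero_add]
  have hfe : ∀ k : Int, 0 < k → k ≤ (sA.length : Int) → k ≤ (sB.length : Int) →
      (feasible sA sB k = true ↔ k ≤ (gN sA sB : Int)) := by
    intro k hk hkA hkB
    rw [feasible_iff sA sB k (by omega) (by omega) (by omega)]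
    constructor
    · intro h
      have := feas_le_gN sB sA k.toNat h
      omega
    · intro h
      have hle : k.toNat ≤ gN sA sB := by omega
      have : gN sA sB = k.toNat + (gN sA sB - k.toNat) := by omega
      rw [this] at hG1
      exact feas_mono sA sB hsb _ _ hG1
  exact (bsearchLoop_eq sA sB (gN sA sB) hfe
    (sA.length + sB.length + 1) 0 _ (by omega) (by omega)
    (by omega) (by omega) (by omega) (by omega)).symm
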